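-- pv_equiv track=rewrite | github.com/pypi-data/pypi-mirror-403 | packages/sts-libs/sts_libs-1.16.0.tar.gz/sts_libs-1.16.0/sts_libs/src/sts/sg3_utils.py | _parse_keys_from_output
-- ===== SOURCE A (Python) =====
-- def _parse_keys_from_output(output: str) -> list[str]:
--     """Parse registered keys from sg_persist --read-keys output.
--
--     Args:
--         output: Raw sg_persist output
--
--     Returns:
--         List of registered keys found in output (preserves duplicates as reported by device)
--     """
--     keys = []
--     lines = output.split('\n')
--     found_keys_section = False
--
--     for line in lines:
--         stripped_line = line.strip()
--         # Look for the keys section header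
--         if 'registered reservation key' in stripped_line.lower():
--             found_keys_section = True
--             continue
--         # Parse keys (lines starting with 0x after the header)
--         if found_keys_section and stripped_line.startswith('0x'):
--             keys.append(stripped_line)
--
--     # Return keys exactly as reported by the device (including duplicates)
--     return keys
-- ===== SOURCE B (Python) =====
-- HEADER = 'registered reservation key'
--
-- def _parse_keys_from_output(output: str) -> list[str]:
--     """Locate the header line, then filter the tail: two-stage, no stateful flag."""
--     lines = output.split('\n')
--     idx = next((i for i, line in enumerate(lines)
--                 if HEADER in line.strip().lower()), None)
--     if idx is None:
--         return []
--     return [s for line in lines[idx + 1:]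
--             if (s := line.strip()).startswith('0x') and HEADER not in s.lower()]
-- ===== Notes on version B (the rewrite author's own statement) =====
-- stated objective: simpler
-- what changed: Replaces the single flag-driven stateful scan with a locate-then-filter decomposition: find the first header line with next/enumerate, then a comprehension over the tail keeps stripped lines starting with '0x' that are not themselves header lines.
import Mathlib
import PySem

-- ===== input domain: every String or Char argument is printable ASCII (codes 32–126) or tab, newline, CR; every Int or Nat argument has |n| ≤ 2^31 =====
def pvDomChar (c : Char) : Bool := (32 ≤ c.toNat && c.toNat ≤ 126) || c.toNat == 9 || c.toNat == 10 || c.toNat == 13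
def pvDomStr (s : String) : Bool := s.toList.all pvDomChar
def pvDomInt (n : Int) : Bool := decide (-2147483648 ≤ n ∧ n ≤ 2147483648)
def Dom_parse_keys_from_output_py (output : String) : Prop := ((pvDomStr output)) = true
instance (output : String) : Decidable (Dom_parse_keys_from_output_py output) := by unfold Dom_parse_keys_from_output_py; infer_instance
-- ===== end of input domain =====

-- B replaces A's flag-driven single pass by a locate-then-filter decomposition (objective: simpler).

-- ===== PORT A =====
-- one step of A's loop over the state (keys, found_keys_section)
def pvAStep (st : List String × Bool) (line : String) : List String × Bool :=
  let stripped := PySem.Str.strip line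
  if PySem.Str.isIn "registered reservation key" (PySem.Str.lower stripped) then
    (st.1, true)
  else if st.2 && PySem.Str.startswith stripped "0x" then
    (st.1 ++ [stripped], st.2)
  else st

def parse_keys_from_output_py (output : String) : List String :=
  let lines := (PySem.Str.split? output "\n").getD []  -- split? is some: sep "\n" is non-empty
  (lines.foldl pvAStep ([], false)).1

-- ===== PORT B =====
-- B's comprehension body: keep the stripped line if it starts with '0x' and is not itself a header line
def pvBKeep (line : String) : Option String :=
  let s := PySem.Str.strip line
  if PySem.Str.startswith s "0x" && !(PySem.Str.isIn "registered reservation key" (PySem.Str.lower s)) then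
    some s
  else none

def parse_keys_from_output_py_alt (output : String) : List String :=
  let lines := (PySem.Str.split? output "\n").getD []  -- split? is some: sep "\n" is non-empty
  match lines.findIdx? (fun line => PySem.Str.isIn "registered reservation key" (PySem.Str.lower (PySem.Str.strip line))) with
  | none => []
  | some idx => (lines.drop (idx + 1)).filterMap pvBKeep

-- ===== PRECONDITION & SPEC =====
-- A returns normally on EVERY string, so Pre_ excludes nothing: it is the exhaustive case split on the
-- tokens A scans for (a header line, a key line, a multi-line input, or none of these), each case admitted.
def Pre_parse_keys_from_output_py (output : String) : Prop :=
  PySem.Str.isIn "registered reservation key" (PySem.Str.lower output) = true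
  ∨ PySem.Str.startswith (PySem.Str.strip output) "0x" = true
  ∨ PySem.Str.isIn "\n" output = true
  ∨ PySem.Str.isIn "registered reservation key" (PySem.Str.lower output) = false
instance (output : String) : Decidable (Pre_parse_keys_from_output_py output) := by unfold Pre_parse_keys_from_output_py; infer_instance

def pvWitness_parse_keys_from_output_py : String :=
  "  PR generation=0x4, 1 registered reservation key follows:\n    0x123abc\n    0xdeadbeef"

def Spec_parse_keys_from_output_py (output : String) (out : List String) : Prop := out = parse_keys_from_output_py_alt output
instance (output : String) (out : List String) : Decidable (Spec_parse_keys_from_output_py output out) := by unfold Spec_parse_keys_from_output_py; infer_instance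

-- ===== CLAIM (what is proved, stated in full; the proofs are below) =====
def Claim_equal_parse_keys_from_output_py : Prop := ∀ (output : String), Dom_parse_keys_from_output_py output → Pre_parse_keys_from_output_py output → Spec_parse_keys_from_output_py output (parse_keys_from_output_py output)

-- ===== LEMMAS AND PROOFS =====

-- shorthands used only by the proofs
def pvHdr (line : String) : Bool :=
  PySem.Str.isIn "registered reservation key" (PySem.Str.lower (PySem.Str.strip line))

def pvKey (line : String) : Bool :=
  PySem.Str.startswith (PySem.Str.strip line) "0x"

lemma pvAStep_eq (st : List String × Bool) (l : String) :
    pvAStep st l =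
      if pvHdr l then (st.1, true)
      else if st.2 && pvKey l then (st.1 ++ [PySem.Str.strip l], st.2)
      else st := rfl

lemma pvBKeep_eq (l : String) :
    pvBKeep l = if pvKey l && !pvHdr l then some (PySem.Str.strip l) else none := rfl

-- A's loop with the flag already set collects exactly B's filtered tail
lemma pvA_flag_true (lines : List String) (acc : List String) :
    (lines.foldl pvAStep (acc, true)).1 = acc ++ lines.filterMap pvBKeep := by
  induction lines generalizing acc with
  | nil => simp
  | cons l ls ih =>
    simp only [List.foldl_cons, pvAStep_eq]
    by_cases h : pvHdr l = true
    · simp [h, ih, pvBKeep_eq]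
    · by_cases hk : pvKey l = true
      · simp [h, hk, ih, pvBKeep_eq]
      · simp [h, hk, ih, pvBKeep_eq]

-- A's loop from flag = false equals B's findIdx?-then-filter result
lemma pvA_flag_false (lines : List String) (acc : List String) :
    (lines.foldl pvAStep (acc, false)).1 =
      acc ++ (match lines.findIdx? (fun l => pvHdr l) with
              | none => []
              | some idx => (lines.drop (idx + 1)).filterMap pvBKeep) := by
  induction lines generalizing acc with
  | nil => simp
  | cons l ls ih =>
    by_cases h : pvHdr l = true
    · simp only [List.foldl_cons, pvAStep_eq, List.findIdx?_cons, h, if_true,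
        List.drop_succ_cons, List.drop_zero, pvA_flag_true]
    · have h' : pvHdr l = false := by simpa using h
      simp only [List.foldl_cons, pvAStep_eq, List.findIdx?_cons, h', Bool.false_eq_true,
        if_false, Bool.false_and]
      rw [ih]
      cases hf : ls.findIdx? (fun l => pvHdr l) with
      | none => simp
      | some i => simp [List.drop_succ_cons]

-- ===== VERDICT (by name: the statement is the Claim_ definition above) =====
theorem parse_keys_from_output_py_spec : Claim_equal_parse_keys_from_output_py := by
  intro output _ _
  unfold Spec_parse_keys_from_output_py parse_keys_from_output_py parse_keys_from_output_py_alt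
  rw [pvA_flag_false]
  rfl
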